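-- pv_equiv track=rewrite | github.com/marekniedzwiedz/evoloza | run.py | find_anchor_snippet_ranges
-- ===== SOURCE A (Python) =====
-- from typing import Any, Callable, Dict, List, Optional, Tuple
--
-- def find_anchor_snippet_ranges(
--     lines: List[str],
--     anchor_snippet: str,
--     limit: int = 2,
-- ) -> List[Tuple[int, int]]:
--     snippet_lines = str(anchor_snippet or "").strip("\n").splitlines()
--     if not snippet_lines:
--         return []
--     matches = find_subsequence_matches(lines, snippet_lines)
--     ranges = []
--     for start in matches[:limit]:
--         ranges.append((start, start + len(snippet_lines) - 1))
--     return ranges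
--
-- def find_subsequence_matches(haystack: List[str], needle: List[str]) -> List[int]:
--     if not needle or len(needle) > len(haystack):
--         return []
--     width = len(needle)
--     return [index for index in range(len(haystack) - width + 1) if haystack[index : index + width] == needle]
-- ===== SOURCE B (Python) =====
-- def find_anchor_snippet_ranges(lines, anchor_snippet, limit=2):
--     snippet = str(anchor_snippet or "").strip("\n").splitlines()
--     if not snippet:
--         return []
--     # Bitap-style staged DP: one boolean array pass per snippet line, back to front.
--     # After processing the last k snippet lines, ok[i] == (lines[i:i+k] matches that suffix);
--     # no window slice is ever extracted or compared.
--     ok = [True] * (len(lines) + 1)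
--     for needle_line in reversed(snippet):
--         ok = [line == needle_line and tail for line, tail in zip(lines, ok[1:])]
--     width = len(snippet)
--     matches = [i for i, b in enumerate(ok) if b]
--     return [(i, i + width - 1) for i in matches[:limit]]
-- ===== Notes on version B (the rewrite author's own statement) =====
-- stated objective: alternative
-- what changed: Replaces A's per-index window-slice comparison with a bitap-style dynamic program: one boolean array over haystack positions is refined by a separate pass per snippet line (processed back to front), so no slice is ever built or compared; matches are read off the final array.
import Mathlib
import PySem

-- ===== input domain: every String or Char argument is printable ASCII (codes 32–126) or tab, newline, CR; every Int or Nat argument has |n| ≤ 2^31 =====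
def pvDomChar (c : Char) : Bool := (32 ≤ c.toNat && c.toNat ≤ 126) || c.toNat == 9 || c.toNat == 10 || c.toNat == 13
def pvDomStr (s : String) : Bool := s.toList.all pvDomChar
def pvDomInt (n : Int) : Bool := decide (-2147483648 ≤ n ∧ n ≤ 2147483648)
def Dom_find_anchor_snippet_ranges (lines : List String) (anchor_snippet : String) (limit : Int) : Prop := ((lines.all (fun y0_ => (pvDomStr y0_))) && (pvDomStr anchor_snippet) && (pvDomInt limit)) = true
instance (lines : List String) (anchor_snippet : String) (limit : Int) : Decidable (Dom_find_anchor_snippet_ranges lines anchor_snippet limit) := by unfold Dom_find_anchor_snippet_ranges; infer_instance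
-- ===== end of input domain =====

-- B replaces A's per-index window-slice comparison with a bitap-style dynamic program: a
-- boolean array over haystack positions is refined by one pass per snippet line (back to
-- front), so no window slice is ever built or compared; objective: alternative.

-- ===== PORT A =====
def find_subsequence_matches (haystack : List String) (needle : List String) : List Int :=
  if needle = [] ∨ (haystack.length : Int) < (needle.length : Int) then []
  else
    (PySem.List.pyRange 0 ((haystack.length : Int) - (needle.length : Int) + 1) 1).filter
      (fun index => PySem.List.slice haystack (some index) (some (index + (needle.length : Int))) == needle)

def find_anchor_snippet_ranges (lines : List String) (anchor_snippet : String) (limit : Int) : List (Int × Int) :=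
  let snippet_lines := PySem.Str.splitlines (PySem.Str.stripChars (if anchor_snippet = "" then "" else anchor_snippet) "\n")
  if snippet_lines = [] then []
  else
    let matches_ := find_subsequence_matches lines snippet_lines
    (PySem.List.slice matches_ none (some limit)).foldl
      (fun ranges start => ranges ++ [(start, start + (snippet_lines.length : Int) - 1)]) []

-- ===== PORT B =====
def find_anchor_snippet_ranges_alt (lines : List String) (anchor_snippet : String) (limit : Int) : List (Int × Int) :=
  let snippet := PySem.Str.splitlines (PySem.Str.stripChars (if anchor_snippet = "" then "" else anchor_snippet) "\n")
  if snippet = [] then []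
  else
    let ok := snippet.reverse.foldl
      (fun ok nl => (lines.zip (ok.drop 1)).map (fun p => p.1 == nl && p.2))
      (List.replicate (lines.length + 1) true)
    let width : Int := (snippet.length : Int)
    let matches_ := ((PySem.List.enumerate ok 0).filter (fun p => p.2)).map (·.1)
    (PySem.List.slice matches_ none (some limit)).map (fun i => (i, i + width - 1))

-- ===== PRECONDITION & SPEC =====
def Spec_find_anchor_snippet_ranges (lines : List String) (anchor_snippet : String) (limit : Int) (out : List (Int × Int)) : Prop := out = find_anchor_snippet_ranges_alt lines anchor_snippet limit
instance (lines : List String) (anchor_snippet : String) (limit : Int) (out : List (Int × Int)) : Decidable (Spec_find_anchor_snippet_ranges lines anchor_snippet limit out) := by unfold Spec_find_anchor_snippet_ranges; infer_instance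

-- ===== CLAIM (what is proved, stated in full; the proofs are below) =====
def Claim_equal_find_anchor_snippet_ranges : Prop := ∀ (lines : List String) (anchor_snippet : String) (limit : Int), Dom_find_anchor_snippet_ranges lines anchor_snippet limit → Spec_find_anchor_snippet_ranges lines anchor_snippet limit (find_anchor_snippet_ranges lines anchor_snippet limit)

-- ===== LEMMAS AND PROOFS =====

-- the DP array of B after folding a whole needle (foldl over reverse = foldr)
def okOf (lines : List String) (needle : List String) : List Bool :=
  needle.foldr (fun nl ok => (lines.zip (ok.drop 1)).map (fun p => p.1 == nl && p.2))
    (List.replicate (lines.length + 1) true)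

lemma okOf_length (lines needle : List String) :
    (okOf lines needle).length = lines.length + 1 - needle.length := by
  induction needle with
  | nil => simp [okOf]
  | cons nl rest ih =>
    simp only [okOf, List.foldr_cons] at *
    rw [List.length_map, List.length_zip, List.length_drop, ih]
    simp only [List.length_cons]
    omega

lemma okOf_get (lines needle : List String) (k : Nat)
    (hk : k < (okOf lines needle).length) :
    (okOf lines needle)[k] = decide ((lines.drop k).take needle.length = needle) := by
  induction needle generalizing k with
  | nil => simp [okOf, List.getElem_replicate]
  | cons nl rest ih =>
    have hlen := okOf_length lines (nl :: rest)
    have hlenr := okOf_length lines rest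
    simp only [List.length_cons] at hlen
    have hkn : k < lines.length := by omega
    have hk1 : k + 1 < (okOf lines rest).length := by omega
    have hzip : k < (lines.zip ((okOf lines rest).drop 1)).length := by
      rw [List.length_zip, List.length_drop]; omega
    have hk1' : 1 + k < (okOf lines rest).length := by omega
    have h2 := ih (1 + k) hk1'
    simp only [okOf, List.foldr_cons] at hk h2 ⊢
    rw [List.getElem_map, List.getElem_zip, List.getElem_drop, h2]
    rw [Nat.add_comm 1 k]
    rw [List.drop_eq_getElem_cons hkn]
    simp only [List.length_cons, List.take_succ_cons]
    rw [Bool.eq_iff_iff]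
    simp

lemma pv_foldl_append {α β : Type} (f : α → β) (l : List α) (acc : List β) :
    l.foldl (fun a x => a ++ [f x]) acc = acc ++ l.map f := by
  induction l generalizing acc with
  | nil => simp
  | cons x xs ih => simp [ih]

lemma A_matches_eq (lines needle : List String) (h : needle ≠ []) :
    find_subsequence_matches lines needle =
      ((List.range (lines.length + 1 - needle.length)).filter
        (fun k => decide ((lines.drop k).take needle.length = needle))).map (fun k : Nat => (k : Int)) := by
  unfold find_subsequence_matches
  by_cases hbig : (lines.length : Int) < ((needle.length : Nat) : Int)
  · rw [if_pos (Or.inr hbig)]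
    have : lines.length + 1 - needle.length = 0 := by
      have : lines.length < needle.length := by exact_mod_cast hbig
      omega
    simp [this]
  · rw [if_neg (by rintro (h' | h'); exact h h'; exact hbig h')]
    have hmn : needle.length ≤ lines.length := by
      have := not_lt.mp hbig; exact_mod_cast this
    rw [PySem.List.pyRange_one, List.filter_map]
    have hcnt : (((lines.length : Int) - ((needle.length : Nat) : Int) + 1) - 0).toNat
        = lines.length + 1 - needle.length := by omega
    rw [hcnt]
    simp only [Function.comp_def, zero_add]
    congr 1
    apply List.filter_congr
    intro k hk
    rw [List.mem_range] at hk
    rw [PySem.List.slice_natCast_add lines k needle.length]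
    rw [Bool.eq_iff_iff]
    simp

lemma B_matches_eq (ok : List Bool) :
    ((PySem.List.enumerate ok 0).filter (fun p => p.2)).map (·.1) =
      ((List.range ok.length).filter (fun k => ok.getD k false)).map (fun k : Nat => (k : Int)) := by
  rw [PySem.List.enumerate_eq_map_pyRange ok false]
  rw [List.filter_map, List.map_map]
  rw [PySem.List.pyRange_one, List.filter_map, List.map_map]
  simp only [Function.comp_def, zero_add, PySem.List.len_eq, sub_zero, Int.toNat_natCast]
  congr 1
  apply List.filter_congr
  intro k hk
  rw [List.mem_range] at hk
  rw [PySem.List.pyGetD_of_nonneg ok false (by positivity)]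
  simp

theorem main_eq (lines : List String) (anchor_snippet : String) (limit : Int) :
    find_anchor_snippet_ranges lines anchor_snippet limit = find_anchor_snippet_ranges_alt lines anchor_snippet limit := by
  simp only [find_anchor_snippet_ranges, find_anchor_snippet_ranges_alt]
  cases hsp : PySem.Str.splitlines (PySem.Str.stripChars (if anchor_snippet = "" then "" else anchor_snippet) "\n") with
  | nil => simp
  | cons first rest =>
    rw [if_neg (List.cons_ne_nil _ _), if_neg (List.cons_ne_nil _ _)]
    have hok : (first :: rest).reverse.foldl
        (fun ok nl => (lines.zip (ok.drop 1)).map (fun p => p.1 == nl && p.2))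
        (List.replicate (lines.length + 1) true) = okOf lines (first :: rest) := by
      rw [List.foldl_reverse]; rfl
    rw [hok, B_matches_eq, A_matches_eq lines (first :: rest) (List.cons_ne_nil _ _)]
    rw [okOf_length]
    have hfil : (List.range (lines.length + 1 - (first :: rest).length)).filter
          (fun k => (okOf lines (first :: rest)).getD k false)
        = (List.range (lines.length + 1 - (first :: rest).length)).filter
          (fun k => decide ((lines.drop k).take (first :: rest).length = first :: rest)) := by
      apply List.filter_congr
      intro k hk
      rw [List.mem_range] at hk
      have hk' : k < (okOf lines (first :: rest)).length := by rw [okOf_length]; omega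
      rw [List.getD_eq_getElem _ _ hk', okOf_get lines (first :: rest) k hk']
    rw [hfil, pv_foldl_append]
    simp

-- ===== VERDICT (by name: the statement is the Claim_ definition above) =====
theorem find_anchor_snippet_ranges_spec : Claim_equal_find_anchor_snippet_ranges := by
  unfold Claim_equal_find_anchor_snippet_ranges Spec_find_anchor_snippet_ranges
  intro lines anchor_snippet limit _
  exact main_eq lines anchor_snippet limit
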